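-- pv_equiv track=rewrite | github.com/hyedinion/python_study | 키패드누르기.py | calmove
-- ===== SOURCE A (Python) =====
-- def calmove(hand, n):
--     move = 0
--     if n==0:
--         n = 11
--     if hand==0:
--         hand =11
--     if hand>n:
--         while ((hand-1)//3)!=((n-1)//3):
--             hand-=3
--             move +=1
--     else:
--         while ((hand-1)//3)!=((n-1)//3):
--             hand+=3
--             move+=1
--
--     return move+abs(hand-n)
-- ===== SOURCE B (Python) =====
-- def calmove(hand, n):
--     if n == 0:
--         n = 11
--     if hand == 0:
--         hand = 11
--     return abs((hand - 1) // 3 - (n - 1) // 3) + abs((hand - 1) % 3 - (n - 1) % 3)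
-- ===== Notes on version B (the rewrite author's own statement) =====
-- stated objective: faster
-- what changed: Replaced the row-by-row +-3 walk loop with a closed-form Manhattan distance: after the 0->11 remaps, row=(k-1)//3 and col=(k-1)%3 for both keys, return abs(row diff)+abs(col diff).
import Mathlib
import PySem

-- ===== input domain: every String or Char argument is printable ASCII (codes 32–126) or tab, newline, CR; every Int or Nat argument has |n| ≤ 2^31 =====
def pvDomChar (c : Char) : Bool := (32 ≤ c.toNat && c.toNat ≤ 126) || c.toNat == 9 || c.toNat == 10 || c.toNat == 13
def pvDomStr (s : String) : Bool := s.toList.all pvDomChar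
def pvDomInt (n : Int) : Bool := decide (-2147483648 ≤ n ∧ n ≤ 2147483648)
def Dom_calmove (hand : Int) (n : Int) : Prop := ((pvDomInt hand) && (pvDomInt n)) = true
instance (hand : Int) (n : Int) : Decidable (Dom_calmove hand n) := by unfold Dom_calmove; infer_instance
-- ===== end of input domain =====

-- B replaces A's row-by-row ±3 walk loop with a closed-form Manhattan distance (faster: O(1) vs O(row distance)).

-- ===== PORT A =====
-- A's while loops, walking hand by -3 (resp. +3) until the rows agree; ported with a
-- fuel guard equal to the number of iterations the Python loop performs (the row
-- distance), which merely makes the same computation total.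
def calmoveDown (fuel : Nat) (hand n move : Int) : Int :=
  match fuel with
  | 0 => move + |hand - n|
  | f + 1 =>
    if PySem.Int.floordiv (hand - 1) 3 ≠ PySem.Int.floordiv (n - 1) 3 then
      calmoveDown f (hand - 3) n (move + 1)
    else move + |hand - n|

def calmoveUp (fuel : Nat) (hand n move : Int) : Int :=
  match fuel with
  | 0 => move + |hand - n|
  | f + 1 =>
    if PySem.Int.floordiv (hand - 1) 3 ≠ PySem.Int.floordiv (n - 1) 3 then
      calmoveUp f (hand + 3) n (move + 1)
    else move + |hand - n|

def calmove (hand : Int) (n : Int) : Int :=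
  let n := if n = 0 then 11 else n
  let hand := if hand = 0 then 11 else hand
  if hand > n then
    calmoveDown (PySem.Int.floordiv (hand - 1) 3 - PySem.Int.floordiv (n - 1) 3).toNat hand n 0
  else
    calmoveUp (PySem.Int.floordiv (n - 1) 3 - PySem.Int.floordiv (hand - 1) 3).toNat hand n 0

-- ===== PORT B =====
def calmove_alt (hand : Int) (n : Int) : Int :=
  let n := if n = 0 then 11 else n
  let hand := if hand = 0 then 11 else hand
  |PySem.Int.floordiv (hand - 1) 3 - PySem.Int.floordiv (n - 1) 3| +
    |PySem.Int.mod (hand - 1) 3 - PySem.Int.mod (n - 1) 3|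

-- ===== PRECONDITION & SPEC =====
def Spec_calmove (hand : Int) (n : Int) (out : Int) : Prop := out = calmove_alt hand n
instance (hand : Int) (n : Int) (out : Int) : Decidable (Spec_calmove hand n out) := by unfold Spec_calmove; infer_instance

-- ===== CLAIM (what is proved, stated in full; the proofs are below) =====
def Claim_equal_calmove : Prop := ∀ (hand : Int) (n : Int), Dom_calmove hand n → Spec_calmove hand n (calmove hand n)

-- ===== LEMMAS AND PROOFS =====

-- The down loop with fuel = exact row distance k computes k + |hand - 3k - n|.
theorem calmoveDown_eval (k : Nat) : ∀ (hand n move : Int),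
    PySem.Int.floordiv (hand - 1) 3 = PySem.Int.floordiv (n - 1) 3 + k →
    calmoveDown k hand n move = move + k + |hand - 3 * k - n| := by
  induction k with
  | zero =>
    intro hand n move h
    simp [calmoveDown]
  | succ f ih =>
    intro hand n move h
    rw [calmoveDown, if_pos (by omega)]
    have h' : PySem.Int.floordiv (hand - 3 - 1) 3 = PySem.Int.floordiv (n - 1) 3 + f := by
      simp only [show ∀ a : Int, PySem.Int.floordiv a 3 = a / 3 from
        fun a => PySem.Int.floordiv_eq_ediv_of_pos (by omega)] at h ⊢
      omega
    rw [ih (hand - 3) n (move + 1) h']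
    have e : hand - 3 - 3 * (f : Int) - n = hand - 3 * ((f + 1 : Nat) : Int) - n := by
      push_cast; ring
    rw [e]
    push_cast
    ring

theorem calmoveUp_eval (k : Nat) : ∀ (hand n move : Int),
    PySem.Int.floordiv (n - 1) 3 = PySem.Int.floordiv (hand - 1) 3 + k →
    calmoveUp k hand n move = move + k + |hand + 3 * k - n| := by
  induction k with
  | zero =>
    intro hand n move h
    simp [calmoveUp]
  | succ f ih =>
    intro hand n move h
    rw [calmoveUp, if_pos (by omega)]
    have h' : PySem.Int.floordiv (n - 1) 3 = PySem.Int.floordiv (hand + 3 - 1) 3 + f := by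
      simp only [show ∀ a : Int, PySem.Int.floordiv a 3 = a / 3 from
        fun a => PySem.Int.floordiv_eq_ediv_of_pos (by omega)] at h ⊢
      omega
    rw [ih (hand + 3) n (move + 1) h']
    have e : hand + 3 + 3 * (f : Int) - n = hand + 3 * ((f + 1 : Nat) : Int) - n := by
      push_cast; ring
    rw [e]
    push_cast
    ring

-- Core equality, with the 0→11 remaps already applied.
theorem calmove_core (hand n : Int) :
    (if hand > n then
      calmoveDown (PySem.Int.floordiv (hand - 1) 3 - PySem.Int.floordiv (n - 1) 3).toNat hand n 0
    else
      calmoveUp (PySem.Int.floordiv (n - 1) 3 - PySem.Int.floordiv (hand - 1) 3).toNat hand n 0)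
    = |PySem.Int.floordiv (hand - 1) 3 - PySem.Int.floordiv (n - 1) 3| +
        |PySem.Int.mod (hand - 1) 3 - PySem.Int.mod (n - 1) 3| := by
  rw [PySem.Int.floordiv_eq_ediv_of_pos (a := hand - 1) (by omega),
      PySem.Int.floordiv_eq_ediv_of_pos (a := n - 1) (by omega),
      PySem.Int.mod_eq_emod_of_pos (a := hand - 1) (by omega),
      PySem.Int.mod_eq_emod_of_pos (a := n - 1) (by omega)]
  split_ifs with hgt
  · have hrow : (hand - 1) / 3 ≥ (n - 1) / 3 := by omega
    set k : Nat := ((hand - 1) / 3 - (n - 1) / 3).toNat with hk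
    have hkeq : ((hand - 1) / 3 : Int) = (n - 1) / 3 + k := by omega
    rw [calmoveDown_eval k hand n 0
      (by simp only [show ∀ a : Int, PySem.Int.floordiv a 3 = a / 3 from
            fun a => PySem.Int.floordiv_eq_ediv_of_pos (by omega)]; exact hkeq)]
    have e2 : hand - 3 * (k : Int) - n = (hand - 1) % 3 - (n - 1) % 3 := by omega
    have e1 : |((hand - 1) / 3 - (n - 1) / 3 : Int)| = (k : Int) := by
      rw [abs_of_nonneg (by omega)]; omega
    rw [e2, e1]; ring
  · have hrow : (hand - 1) / 3 ≤ (n - 1) / 3 := by omega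
    set k : Nat := ((n - 1) / 3 - (hand - 1) / 3).toNat with hk
    have hkeq : ((n - 1) / 3 : Int) = (hand - 1) / 3 + k := by omega
    rw [calmoveUp_eval k hand n 0
      (by simp only [show ∀ a : Int, PySem.Int.floordiv a 3 = a / 3 from
            fun a => PySem.Int.floordiv_eq_ediv_of_pos (by omega)]; exact hkeq)]
    have e2 : hand + 3 * (k : Int) - n = (hand - 1) % 3 - (n - 1) % 3 := by omega
    have e1 : |((hand - 1) / 3 - (n - 1) / 3 : Int)| = (k : Int) := by
      rw [abs_of_nonpos (by omega)]; omega
    rw [e2, e1]; ring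

-- ===== VERDICT (by name: the statement is the Claim_ definition above) =====
theorem calmove_spec : Claim_equal_calmove := by
  intro hand n _
  unfold Spec_calmove calmove calmove_alt
  exact calmove_core _ _
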